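-- pv_equiv track=rewrite | github.com/XenocodeRCE/philo52 | philo52.py | split_if_four_quotes
-- ===== SOURCE A (Python) =====
-- def split_if_four_quotes(s):
--     indices = [i for i in range(len(s)) if s[i] == '"']
--     if len(indices) == 4:
--         third_quote_index = indices[2] + 1
--         part1 = s[:third_quote_index].strip()
--         part2 = s[third_quote_index:].strip()
--         return [part1, part2]
--     return [s]
-- ===== SOURCE B (Python) =====
-- def split_if_four_quotes(s):
--     parts = s.split('"')
--     if len(parts) == 5:
--         part1 = ('"'.join(parts[:3]) + '"').strip()
--         part2 = '"'.join(parts[3:]).strip()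
--         return [part1, part2]
--     return [s]
-- ===== Notes on version B (the rewrite author's own statement) =====
-- stated objective: faster
-- what changed: B splits the string on the quote delimiter and reassembles the two halves by joining segments, instead of collecting all quote indices with a Python-level index comprehension and slicing at the third index; the per-character work moves into C-level str.split/str.join.
import Mathlib
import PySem

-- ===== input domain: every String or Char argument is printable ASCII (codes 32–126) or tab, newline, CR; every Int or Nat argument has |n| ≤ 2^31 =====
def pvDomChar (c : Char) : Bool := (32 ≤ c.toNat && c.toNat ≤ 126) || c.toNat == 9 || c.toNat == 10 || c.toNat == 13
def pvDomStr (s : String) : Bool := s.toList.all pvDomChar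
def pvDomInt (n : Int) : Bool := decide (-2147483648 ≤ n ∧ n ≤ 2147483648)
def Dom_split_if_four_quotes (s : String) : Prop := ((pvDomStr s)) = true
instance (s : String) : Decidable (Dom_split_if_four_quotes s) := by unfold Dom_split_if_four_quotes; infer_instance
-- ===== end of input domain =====

-- B splits on the quote delimiter and reassembles the two halves by joining segments,
-- instead of collecting quote indices and slicing at the third one (measured faster: C-level split/join).

-- ===== PORT A =====
def split_if_four_quotes (s : String) : List String :=
  let indices : List Int :=
    (PySem.List.pyRange 0 (PySem.Str.len s) 1).filter
      (fun i => PySem.Str.pyGet? s i == some '"')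
  if indices.length = 4 then
    let third : Int := PySem.List.pyGetD indices 2 0 + 1
    let part1 := PySem.Str.strip (PySem.Str.slice s none (some third))
    let part2 := PySem.Str.strip (PySem.Str.slice s (some third) none)
    [part1, part2]
  else [s]

-- ===== PORT B =====
-- s.split('"') / '"'.join are PySem.Chars.splitOn / PySem.Chars.join on s.toList
-- (there is no String-level splitOn wrapper in the prelude).
def split_if_four_quotes_alt (s : String) : List String :=
  let parts : List (List Char) := PySem.Chars.splitOn s.toList ['"']
  if parts.length = 5 then
    let part1 := PySem.Chars.strip (PySem.Chars.join ['"'] (parts.take 3) ++ ['"'])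
    let part2 := PySem.Chars.strip (PySem.Chars.join ['"'] (parts.drop 3))
    [String.ofList part1, String.ofList part2]
  else [s]

-- ===== PRECONDITION & SPEC =====
def Spec_split_if_four_quotes (s : String) (out : List String) : Prop := out = split_if_four_quotes_alt s
instance (s : String) (out : List String) : Decidable (Spec_split_if_four_quotes s out) := by unfold Spec_split_if_four_quotes; infer_instance

-- ===== CLAIM (what is proved, stated in full; the proofs are below) =====
def Claim_equal_split_if_four_quotes : Prop := ∀ (s : String), Dom_split_if_four_quotes s → Spec_split_if_four_quotes s (split_if_four_quotes s)

-- ===== LEMMAS AND PROOFS =====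

/-- Proof-side model of `s.split('"')`: structural recursion on the character list. -/
def pvSplit : List Char → List (List Char)
  | [] => [[]]
  | c :: cs =>
    if c = '"' then [] :: pvSplit cs
    else
      match pvSplit cs with
      | [] => [[c]]
      | p :: ps => (c :: p) :: ps

/-- Proof-side model of A's quote-index list (as Nats). -/
def pvPos : List Char → List Nat
  | [] => []
  | c :: cs => if c = '"' then 0 :: (pvPos cs).map (· + 1) else (pvPos cs).map (· + 1)

theorem pvSplit_ne_nil : ∀ cs, pvSplit cs ≠ []
  | [] => by simp [pvSplit]
  | c :: cs => by
    by_cases h : c = '"' <;> cases h2 : pvSplit cs <;> simp [pvSplit, h, h2]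

theorem pvSplit_cons_exists (cs : List Char) : ∃ p ps, pvSplit cs = p :: ps := by
  cases h : pvSplit cs with
  | nil => exact absurd h (pvSplit_ne_nil cs)
  | cons p ps => exact ⟨p, ps, rfl⟩

theorem go_eq (fuel : Nat) (l cur : List Char) (acc : List (List Char))
    (p : List Char) (ps : List (List Char))
    (hf : l.length < fuel) (hs : pvSplit l = p :: ps) :
    PySem.Chars.splitOn.go ['"'] fuel l cur acc = acc.reverse ++ (cur.reverse ++ p) :: ps := by
  induction fuel generalizing l cur acc p ps with
  | zero => omega
  | succ fuel ih =>
    cases l with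
    | nil =>
      simp [pvSplit] at hs
      simp [PySem.Chars.splitOn.go, hs.1, hs.2]
    | cons c rest =>
      by_cases hc : c = '"'
      · subst hc
        simp only [pvSplit] at hs
        obtain ⟨p', ps', h2⟩ := pvSplit_cons_exists rest
        rw [h2] at hs
        obtain ⟨hp, hps⟩ := List.cons.injEq .. ▸ hs
        have hrec := ih rest [] (cur.reverse :: acc) p' ps' (by simp at hf ⊢; omega) h2
        simp [PySem.Chars.splitOn.go, List.isPrefixOf, hrec, ← hp, ← hps]
      · obtain ⟨p', ps', h2⟩ := pvSplit_cons_exists rest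
        simp only [pvSplit, if_neg hc, h2] at hs
        obtain ⟨hp, hps⟩ := List.cons.injEq .. ▸ hs
        have hrec := ih rest (c :: cur) acc p' ps' (by simp at hf ⊢; omega) h2
        simp [PySem.Chars.splitOn.go, List.isPrefixOf, Ne.symm hc, hrec, ← hp, ← hps]

theorem splitOn_eq_pvSplit (cs : List Char) : PySem.Chars.splitOn cs ['"'] = pvSplit cs := by
  obtain ⟨p, ps, h2⟩ := pvSplit_cons_exists cs
  rw [PySem.Chars.splitOn, go_eq (cs.length + 1) cs [] [] p ps (by omega) h2]
  simp [h2]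

theorem length_pvSplit : ∀ cs, (pvSplit cs).length = (pvPos cs).length + 1
  | [] => by simp [pvSplit, pvPos]
  | c :: cs => by
    have ih := length_pvSplit cs
    obtain ⟨p, ps, h2⟩ := pvSplit_cons_exists cs
    by_cases h : c = '"'
    · simp [pvSplit, pvPos, h, ih]
    · rw [h2] at ih
      simp [pvSplit, pvPos, h, h2]
      simpa using ih

theorem join_pvSplit : ∀ cs, PySem.Chars.join ['"'] (pvSplit cs) = cs
  | [] => by simp [pvSplit, PySem.Chars.join_singleton]
  | c :: cs => by
    have ih := join_pvSplit cs
    obtain ⟨p, ps, h2⟩ := pvSplit_cons_exists cs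
    by_cases h : c = '"'
    · rw [pvSplit, if_pos h, h2, PySem.Chars.join_cons_cons, ← h2, ih, h]
      simp
    · rw [pvSplit, if_neg h, h2]
      cases ps with
      | nil =>
        rw [PySem.Chars.join_singleton]
        rw [h2, PySem.Chars.join_singleton] at ih
        simp [ih]
      | cons q qs =>
        rw [PySem.Chars.join_cons_cons]
        rw [h2, PySem.Chars.join_cons_cons] at ih
        simp [← ih]

theorem indices_eq_pvPos (cs : List Char) :
    (List.range cs.length).filter (fun k => cs[k]? == some '"') = pvPos cs := by
  induction cs with
  | nil => simp [pvPos]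
  | cons c cs ih =>
    rw [List.length_cons, List.range_succ_eq_map, List.filter_cons, List.filter_map]
    have hcomp : ((fun k => (c :: cs)[k]? == some '"') ∘ Nat.succ)
        = (fun k => cs[k]? == some '"') := by
      funext k; simp [Function.comp]
    rw [hcomp, ih]
    by_cases h : c = '"' <;>
      simp [pvPos, h]

theorem join_cons_head (c : Char) (p : List Char) (xs : List (List Char)) :
    PySem.Chars.join ['"'] ((c :: p) :: xs) = c :: PySem.Chars.join ['"'] (p :: xs) := by
  cases xs with
  | nil => rw [PySem.Chars.join_singleton, PySem.Chars.join_singleton]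
  | cons q qs => rw [PySem.Chars.join_cons_cons, PySem.Chars.join_cons_cons]; simp

theorem cut_eq : ∀ (cs : List Char) (k : Nat) (hk : k < (pvPos cs).length),
    cs.take ((pvPos cs)[k] + 1)
      = PySem.Chars.join ['"'] ((pvSplit cs).take (k + 1)) ++ ['"']
    ∧ cs.drop ((pvPos cs)[k] + 1)
      = PySem.Chars.join ['"'] ((pvSplit cs).drop (k + 1))
  | [], k, hk => by simp [pvPos] at hk
  | c :: cs, k, hk => by
    obtain ⟨p, ps, h2⟩ := pvSplit_cons_exists cs
    have hjoin := join_pvSplit cs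
    rw [h2] at hjoin
    by_cases h : c = '"'
    · subst h
      cases k with
      | zero =>
        constructor
        · simp [pvPos, pvSplit, h2, PySem.Chars.join_singleton]
        · simp [pvPos, pvSplit, h2, hjoin]
      | succ k =>
        have hk' : k < (pvPos cs).length := by
          simpa [pvPos] using hk
        obtain ⟨IH1, IH2⟩ := cut_eq cs k hk'
        rw [h2] at IH1 IH2
        have hidx : (pvPos ('"' :: cs))[k + 1]'hk = (pvPos cs)[k]'hk' + 1 := by
          simp [pvPos]
        rw [hidx]
        have hsplit : pvSplit ('"' :: cs) = [] :: p :: ps := by simp [pvSplit, h2]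
        constructor
        · show '"' :: cs.take ((pvPos cs)[k]'hk' + 1) = _
          rw [IH1, hsplit,
            show List.take (k + 2) ([] :: p :: ps) = [] :: p :: List.take k ps from by simp,
            PySem.Chars.join_cons_cons,
            show List.take (k + 1) (p :: ps) = p :: List.take k ps from by simp]
          simp
        · show cs.drop ((pvPos cs)[k]'hk' + 1) = _
          rw [IH2, hsplit,
            show List.drop (k + 2) ([] :: p :: ps) = List.drop (k + 1) (p :: ps) from by simp]
    · have hk' : k < (pvPos cs).length := by
        simpa [pvPos, h] using hk
      obtain ⟨IH1, IH2⟩ := cut_eq cs k hk'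
      rw [h2] at IH1 IH2
      have hidx : (pvPos (c :: cs))[k]'hk = (pvPos cs)[k]'hk' + 1 := by
        simp [pvPos, h]
      rw [hidx]
      have hsplit : pvSplit (c :: cs) = (c :: p) :: ps := by simp [pvSplit, h, h2]
      constructor
      · show c :: cs.take ((pvPos cs)[k]'hk' + 1) = _
        rw [IH1, hsplit,
          show List.take (k + 1) ((c :: p) :: ps) = (c :: p) :: List.take k ps from by simp,
          join_cons_head]
        simp
      · show cs.drop ((pvPos cs)[k]'hk' + 1) = _
        rw [IH2, hsplit, List.drop_succ_cons, List.drop_succ_cons]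

theorem indicesInt_eq (s : String) :
    (PySem.List.pyRange 0 (PySem.Str.len s) 1).filter
      (fun i => PySem.Str.pyGet? s i == some '"')
    = List.map (fun k : Nat => (k : Int)) (pvPos s.toList) := by
  rw [PySem.Str.len, PySem.List.pyRange_zero_natCast, List.filter_map]
  have hcomp : ((fun i => PySem.Str.pyGet? s i == some '"') ∘ fun k : Nat => (k : Int))
      = (fun k => s.toList[k]? == some '"') := by
    funext k; simp [Function.comp]
  rw [hcomp, indices_eq_pvPos]

theorem strip_slice_to (s : String) (m : Nat) :
    PySem.Str.strip (PySem.Str.slice s none (some (m : Int)))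
      = String.ofList (PySem.Chars.strip (s.toList.take m)) := by
  rw [PySem.Str.strip, PySem.Str.toList_slice, PySem.Chars.slice_eq_listSlice,
    PySem.List.slice_to_natCast]

theorem strip_slice_from (s : String) (m : Nat) :
    PySem.Str.strip (PySem.Str.slice s (some (m : Int)) none)
      = String.ofList (PySem.Chars.strip (s.toList.drop m)) := by
  rw [PySem.Str.strip, PySem.Str.toList_slice, PySem.Chars.slice_eq_listSlice,
    PySem.List.slice_from_natCast]

-- ===== VERDICT (by name: the statement is the Claim_ definition above) =====
theorem split_if_four_quotes_spec : Claim_equal_split_if_four_quotes := by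
  intro s _
  unfold Spec_split_if_four_quotes split_if_four_quotes split_if_four_quotes_alt
  simp only [indicesInt_eq s, splitOn_eq_pvSplit, List.length_map, length_pvSplit]
  by_cases h4 : (pvPos s.toList).length = 4
  · rw [if_pos h4, if_pos (by omega)]
    have h2 : 2 < (pvPos s.toList).length := by omega
    have hi : PySem.List.pyGetD (List.map (fun k : Nat => (k : Int)) (pvPos s.toList)) 2 0
        = ((pvPos s.toList)[2]'h2 : Int) := by
      rw [PySem.List.pyGetD_eq_getElem _ _ (by norm_num) (by simp; omega)]
      simp
    rw [hi]
    obtain ⟨hc1, hc2⟩ := cut_eq s.toList 2 h2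
    have hcast : ∀ m : Nat, (m : Int) + 1 = ((m + 1 : Nat) : Int) := by
      intro m; push_cast; ring
    rw [hcast, strip_slice_to, strip_slice_from, hc1, hc2]
  · rw [if_neg h4, if_neg (by omega)]
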